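-- pv_equiv track=rewrite | github.com/sc0116/Algorithm | BruteForce/Programmers_모의고사.py | solution
-- ===== SOURCE A (Python) =====
-- def solution(answers):
--     answer = []
--     count = [0] * 4
--     check1 = [1, 2, 3, 4, 5]
--     check2 = [2, 1, 2, 3, 2, 4, 2, 5]
--     check3 = [3, 3, 1, 1, 2, 2, 4, 4, 5, 5]
--
--     for a in range(len(answers)):
--         if check1[a % len(check1)] == answers[a]:
--             count[1] += 1
--         if check2[a % len(check2)] == answers[a]:
--             count[2] += 1
--         if check3[a % len(check3)] == answers[a]:
--             count[3] += 1
--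
--     for i in range(len(count)):
--         if max(count) == count[i]:
--             answer.append(i)
--
--     return(answer)
-- ===== SOURCE B (Python) =====
-- def solution(answers):
--     # Histogram approach: one pass records (position mod 40, answer) frequencies
--     # (40 = lcm of the three pattern lengths), then each student's score is a
--     # fixed 40-term lookup sum -- the patterns never touch the answers list.
--     keys = [(i % 40, a) for i, a in enumerate(answers)]
--     hist = {}
--     for k in keys:
--         hist[k] = hist.get(k, 0) + 1
--     patterns = [[1, 2, 3, 4, 5],
--                 [2, 1, 2, 3, 2, 4, 2, 5],
--                 [3, 3, 1, 1, 2, 2, 4, 4, 5, 5]]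
--     counts = [0] + [sum(hist.get((s, p[s % len(p)]), 0) for s in range(40))
--                     for p in patterns]
--     m = max(counts)
--     return [i for i, c in enumerate(counts) if c == m]
-- ===== Notes on version B (the rewrite author's own statement) =====
-- stated objective: alternative
-- what changed: A's per-element triple comparison loop is replaced by building a (index mod 40, answer) frequency dictionary in one pass (40 = lcm of the pattern lengths) and scoring each pattern by a fixed 40-term dictionary-lookup sum, so the patterns never scan the answers; the tie collection becomes enumerate/filter.
import Mathlib
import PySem

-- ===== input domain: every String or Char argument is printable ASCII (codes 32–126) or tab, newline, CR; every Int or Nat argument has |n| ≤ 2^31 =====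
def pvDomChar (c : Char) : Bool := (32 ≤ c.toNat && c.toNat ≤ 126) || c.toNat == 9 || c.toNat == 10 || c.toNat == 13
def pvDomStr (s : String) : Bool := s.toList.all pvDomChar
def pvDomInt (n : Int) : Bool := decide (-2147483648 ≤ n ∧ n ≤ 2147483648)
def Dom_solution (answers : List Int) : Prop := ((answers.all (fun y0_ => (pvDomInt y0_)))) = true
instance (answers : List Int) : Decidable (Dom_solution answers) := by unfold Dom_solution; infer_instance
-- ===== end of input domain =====

-- B replaces A's per-element triple-comparison loop by a (index mod 40, answer) frequency
-- dictionary built in one pass, from which each pattern's score is a fixed 40-term lookup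
-- sum; the tie collection becomes enumerate/filter (objective: alternative).

-- ===== PORT A =====
-- the body of A's combined for-loop (three ifs updating the 4-slot count list)
def solStep (answers : List Int) (count : List Int) (a : Int) : List Int :=
  let check1 : List Int := [1, 2, 3, 4, 5]
  let check2 : List Int := [2, 1, 2, 3, 2, 4, 2, 5]
  let check3 : List Int := [3, 3, 1, 1, 2, 2, 4, 4, 5, 5]
  let count := if PySem.List.pyGetD check1 (PySem.Int.mod a (check1.length : Int)) 0
                  == PySem.List.pyGetD answers a 0
               then PySem.List.pySetD count 1 (PySem.List.pyGetD count 1 0 + 1) else count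
  let count := if PySem.List.pyGetD check2 (PySem.Int.mod a (check2.length : Int)) 0
                  == PySem.List.pyGetD answers a 0
               then PySem.List.pySetD count 2 (PySem.List.pyGetD count 2 0 + 1) else count
  let count := if PySem.List.pyGetD check3 (PySem.Int.mod a (check3.length : Int)) 0
                  == PySem.List.pyGetD answers a 0
               then PySem.List.pySetD count 3 (PySem.List.pyGetD count 3 0 + 1) else count
  count

def solution (answers : List Int) : List Int :=
  let count : List Int :=
    (PySem.List.pyRange 0 (answers.length : Int) 1).foldl (solStep answers) [0, 0, 0, 0]
  -- max(count): count always has length 4, so max? is some; .getD 0 is never used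
  (PySem.List.pyRange 0 (count.length : Int) 1).foldl (fun answer i =>
    if (PySem.List.max? count (fun y => y)).getD 0 == PySem.List.pyGetD count i 0
    then answer ++ [i] else answer) []

-- ===== PORT B =====
-- score of one pattern, read off the (i % 40, answers[i]) histogram: 40 lookups
def patScore (hist : PySem.Dict (Int × Int) Int) (p : List Int) : Int :=
  (PySem.List.pyRange 0 40 1).foldl (fun acc s =>
    acc + hist.getD (s, PySem.List.pyGetD p (PySem.Int.mod s (p.length : Int)) 0) 0) 0

def solution_alt (answers : List Int) : List Int :=
  let keys : List (Int × Int) :=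
    (PySem.List.enumerate answers).map (fun ia => (PySem.Int.mod ia.1 40, ia.2))
  let hist : PySem.Dict (Int × Int) Int :=
    keys.foldl (fun d k => d.insert k (d.getD k 0 + 1)) PySem.Dict.empty
  let patterns : List (List Int) :=
    [[1, 2, 3, 4, 5], [2, 1, 2, 3, 2, 4, 2, 5], [3, 3, 1, 1, 2, 2, 4, 4, 5, 5]]
  let counts : List Int := [0] ++ patterns.map (patScore hist)
  -- max(counts): counts always nonempty ([0] ++ …), so max? is some; .getD 0 is never used
  let m : Int := (PySem.List.max? counts (fun y => y)).getD 0
  ((PySem.List.enumerate counts).filter (fun ic => ic.2 == m)).map (fun ic => ic.1)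

-- ===== PRECONDITION & SPEC =====
def Spec_solution (answers : List Int) (out : List Int) : Prop := out = solution_alt answers
instance (answers : List Int) (out : List Int) : Decidable (Spec_solution answers out) := by unfold Spec_solution; infer_instance

-- ===== CLAIM (what is proved, stated in full; the proofs are below) =====
def Claim_equal_solution : Prop := ∀ (answers : List Int), Dom_solution answers → Spec_solution answers (solution answers)

-- ===== LEMMAS AND PROOFS =====

-- A's single combined loop over the 4-slot count list equals three independent counting folds
theorem pv_loop_fusion (answers : List Int) (l : List Int) (c1 c2 c3 : Int) :
    l.foldl (solStep answers) [0, c1, c2, c3]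
    = [0,
       l.foldl (fun s i => if PySem.List.pyGetD [1,2,3,4,5]
                  (PySem.Int.mod i (([1,2,3,4,5] : List Int).length : Int)) 0
                  == PySem.List.pyGetD answers i 0 then s + 1 else s) c1,
       l.foldl (fun s i => if PySem.List.pyGetD [2,1,2,3,2,4,2,5]
                  (PySem.Int.mod i (([2,1,2,3,2,4,2,5] : List Int).length : Int)) 0
                  == PySem.List.pyGetD answers i 0 then s + 1 else s) c2,
       l.foldl (fun s i => if PySem.List.pyGetD [3,3,1,1,2,2,4,4,5,5]
                  (PySem.Int.mod i (([3,3,1,1,2,2,4,4,5,5] : List Int).length : Int)) 0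
                  == PySem.List.pyGetD answers i 0 then s + 1 else s) c3] := by
  induction l generalizing c1 c2 c3 with
  | nil => rfl
  | cons a l ih =>
    simp only [List.foldl_cons]
    rw [← ih]
    congr 1
    unfold solStep
    cases hA : (PySem.List.pyGetD [1,2,3,4,5] (PySem.Int.mod a (([1,2,3,4,5] : List Int).length : Int)) 0
        == PySem.List.pyGetD answers a 0 : Bool) <;>
      cases hB : (PySem.List.pyGetD [2,1,2,3,2,4,2,5] (PySem.Int.mod a (([2,1,2,3,2,4,2,5] : List Int).length : Int)) 0
        == PySem.List.pyGetD answers a 0 : Bool) <;>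
      cases hC : (PySem.List.pyGetD [3,3,1,1,2,2,4,4,5,5] (PySem.Int.mod a (([3,3,1,1,2,2,4,4,5,5] : List Int).length : Int)) 0
        == PySem.List.pyGetD answers a 0 : Bool) <;>
      (simp only [hA, hB, hC];
       simp [PySem.List.pySetD, PySem.List.pySet?, PySem.List.pyGetD,
         PySem.List.pyGet?, PySem.List.pyIdx?])

-- A's index-loop tie collection over [0,c1,c2,c3] equals B's enumerate/filter/map
theorem pv_collect_eq (c1 c2 c3 m : Int) :
    (PySem.List.pyRange 0 (([0, c1, c2, c3] : List Int).length : Int) 1).foldl (fun answer i =>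
      if m == PySem.List.pyGetD [0, c1, c2, c3] i 0 then answer ++ [i] else answer) []
    = ((PySem.List.enumerate [0, c1, c2, c3]).filter (fun ic => ic.2 == m)).map
        (fun ic => ic.1) := by
  have h : PySem.List.pyRange 0 (([0, c1, c2, c3] : List Int).length : Int) 1 = [0,1,2,3] := by
    simp only [List.length_cons, List.length_nil]
    decide
  have hc : ∀ x : Int, (x == m) = (m == x) := fun x => Bool.beq_comm
  rw [h]
  simp only [PySem.List.enumerate, List.foldl, List.filter_cons, List.filter_nil, hc,
    PySem.List.pyGetD, PySem.List.pyGet?, PySem.List.pyIdx?, beq_iff_eq]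
  norm_num
  clear h hc
  split_ifs <;> simp_all

-- the sum over a duplicate-free index list of "does the single key k equal (s, f s)" indicators
theorem pv_indicator_sum (l : List Int) (hnd : l.Nodup) (f : Int → Int) (m x : Int)
    (hm : m ∈ l) :
    (l.map (fun s => if ((m, x) : Int × Int) == (s, f s) then (1 : Nat) else 0)).sum
    = if x == f m then (1 : Nat) else 0 := by
  induction l with
  | nil => simp at hm
  | cons a l ih =>
    rcases List.nodup_cons.mp hnd with ⟨ha, hnd'⟩
    simp only [List.map_cons, List.sum_cons]
    rcases List.mem_cons.mp hm with rfl | hm'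
    · have hz : (l.map (fun s => if ((m, x) : Int × Int) == (s, f s) then (1 : Nat) else 0)).sum = 0 := by
        apply List.sum_eq_zero
        intro y hy
        rcases List.mem_map.mp hy with ⟨s, hs, rfl⟩
        have hne : m ≠ s := fun h => ha (h ▸ hs)
        simp [Prod.ext_iff, hne]
      rw [hz]
      simp [Prod.ext_iff]
    · have hma : m ≠ a := fun h => ha (h ▸ hm')
      rw [ih hnd' hm']
      have hfa : (((m, x) : Int × Int) == (a, f a)) = false := by
        simp [Prod.ext_iff]; intro h; exact absurd h hma
      simp [hfa]

-- the histogram's 40 lookups for a pattern count exactly the per-index matches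
theorem pv_hist_sum (xs : List Int) (p : List Int) (hp : 0 < p.length)
    (hdvd : ((p.length : Int)) ∣ 40) (j : Int) (hj : 0 ≤ j) :
    ((PySem.List.pyRange 0 40 1).map (fun s =>
        (((PySem.List.enumerate xs j).map
            (fun ia => ((PySem.Int.mod ia.1 40, ia.2) : Int × Int))).count
          (s, PySem.List.pyGetD p (PySem.Int.mod s (p.length : Int)) 0)))).sum
    = (PySem.List.enumerate xs j).countP
        (fun ia => PySem.List.pyGetD p (PySem.Int.mod ia.1 (p.length : Int)) 0 == ia.2) := by
  induction xs generalizing j with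
  | nil => simp [PySem.List.enumerate_nil]
  | cons x xs ih =>
    rw [PySem.List.enumerate_cons]
    simp only [List.map_cons, List.countP_cons, List.count_cons]
    rw [List.sum_map_add]
    rw [ih (j + 1) (by omega)]
    have hind := pv_indicator_sum (PySem.List.pyRange 0 40 1) (PySem.List.nodup_pyRange_one 0 40)
        (fun s => PySem.List.pyGetD p (PySem.Int.mod s (p.length : Int)) 0)
        (PySem.Int.mod j 40) x
        (PySem.List.mem_pyRange_one.mpr
          ⟨PySem.Int.mod_nonneg j (by norm_num), PySem.Int.mod_lt j (by norm_num)⟩)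
    rw [hind]
    have hmm : PySem.Int.mod (PySem.Int.mod j 40) (p.length : Int)
        = PySem.Int.mod j (p.length : Int) := by
      have hL : (0:Int) < (p.length : Int) := by exact_mod_cast hp
      rw [PySem.Int.mod_eq_emod_of_pos (by norm_num : (0:Int) < 40),
          PySem.Int.mod_eq_emod_of_pos hL, PySem.Int.mod_eq_emod_of_pos hL,
          Int.emod_emod_of_dvd _ hdvd]
    simp only [hmm]
    simp [Bool.beq_comm]

-- one pattern's B-score equals A's counting fold over the indices
theorem pv_score_eq (answers : List Int) (p : List Int) (hp : 0 < p.length)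
    (hdvd : ((p.length : Int)) ∣ 40) :
    patScore (((PySem.List.enumerate answers).map
        (fun ia => ((PySem.Int.mod ia.1 40, ia.2) : Int × Int))).foldl
        (fun d k => d.insert k (d.getD k 0 + 1)) PySem.Dict.empty) p
    = (PySem.List.pyRange 0 (answers.length : Int) 1).foldl (fun s i =>
        if PySem.List.pyGetD p (PySem.Int.mod i (p.length : Int)) 0
           == PySem.List.pyGetD answers i 0 then s + 1 else s) 0 := by
  unfold patScore
  rw [PySem.Dict.foldl_insert_getD_add_one_eq_counter]
  rw [PySem.List.foldl_add]
  rw [PySem.List.foldl_if_add_one]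
  simp only [PySem.Dict.getD_counter]
  have hc : (List.map
          (fun s =>
            ((List.count ((s, PySem.List.pyGetD p (PySem.Int.mod s (p.length:Int)) 0) : Int × Int)
                ((PySem.List.enumerate answers).map (fun ia => (PySem.Int.mod ia.1 40, ia.2))) : Nat) : Int))
          (PySem.List.pyRange 0 40 1)).sum
      = (((List.map
          (fun s =>
            List.count ((s, PySem.List.pyGetD p (PySem.Int.mod s (p.length:Int)) 0) : Int × Int)
                ((PySem.List.enumerate answers).map (fun ia => (PySem.Int.mod ia.1 40, ia.2))))
          (PySem.List.pyRange 0 40 1)).sum : Nat) : Int) := by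
    simp only [Nat.cast_list_sum, List.map_map]
    rfl
  rw [hc]
  rw [pv_hist_sum answers p hp hdvd 0 le_rfl]
  rw [PySem.List.enumerate_eq_map_pyRange (d := 0)]
  rw [List.countP_map]
  rfl


-- ===== VERDICT (by name: the statement is the Claim_ definition above) =====
theorem solution_spec : Claim_equal_solution := by
  intro answers _
  unfold Spec_solution solution solution_alt
  simp only [List.map_cons, List.map_nil, List.cons_append, List.nil_append]
  rw [pv_loop_fusion]
  rw [pv_score_eq answers [1,2,3,4,5] (by norm_num) (by norm_num),
      pv_score_eq answers [2,1,2,3,2,4,2,5] (by norm_num) (by norm_num),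
      pv_score_eq answers [3,3,1,1,2,2,4,4,5,5] (by norm_num) (by norm_num)]
  rw [pv_collect_eq]
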